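-- pv_equiv track=rewrite | github.com/andrewlod/programming-challenges | py/index_first_occurrence_string.py | compare_strs
-- ===== SOURCE A (Python) =====
-- from typing import Tuple
--
-- def compare_strs(haystack: str, start_idx: int, needle: str) -> Tuple[bool, int]: # matches, next start idx
--   if start_idx + len(needle) > len(haystack):
--     return (False, -1)
--
--   next_occurrence = -1
--   for i in range(1, len(needle)):
--     if next_occurrence == -1 and haystack[start_idx + i] == needle[0]:
--       next_occurrence = start_idx + i
--
--     if haystack[start_idx + i] != needle[i]:
--       return (False, next_occurrence if next_occurrence != -1 else start_idx + i)
--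
--   return (True, next_occurrence)
-- ===== SOURCE B (Python) =====
-- from typing import Tuple
--
-- def compare_strs(haystack: str, start_idx: int, needle: str) -> Tuple[bool, int]:
--   # Two-phase decomposition: first locate the first mismatch (or a full match),
--   # then search the scanned window once for the next candidate occurrence of needle[0].
--   n = len(needle)
--   if start_idx + n > len(haystack):
--     return (False, -1)
--
--   mismatch = next((i for i in range(1, n) if haystack[start_idx + i] != needle[i]), None)
--   limit = n if mismatch is None else mismatch + 1
--   occurrence = next((start_idx + i for i in range(1, limit)
--                      if haystack[start_idx + i] == needle[0]), -1)
--
--   if mismatch is None: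
--     return (True, occurrence)
--   return (False, occurrence if occurrence != -1 else start_idx + mismatch)
-- ===== Notes on version B (the rewrite author's own statement) =====
-- stated objective: alternative
-- what changed: A's single loop threading a next-occurrence accumulator through the comparison is replaced by two separate phases: first find the first mismatch index (or a full match), then scan the compared window once for the next candidate occurrence of needle[0].
-- outside the precondition, e.g. on compare_strs('aba', -2, 'aaa'): A returns (True, 0), B returns (True, -1)
import Mathlib
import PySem

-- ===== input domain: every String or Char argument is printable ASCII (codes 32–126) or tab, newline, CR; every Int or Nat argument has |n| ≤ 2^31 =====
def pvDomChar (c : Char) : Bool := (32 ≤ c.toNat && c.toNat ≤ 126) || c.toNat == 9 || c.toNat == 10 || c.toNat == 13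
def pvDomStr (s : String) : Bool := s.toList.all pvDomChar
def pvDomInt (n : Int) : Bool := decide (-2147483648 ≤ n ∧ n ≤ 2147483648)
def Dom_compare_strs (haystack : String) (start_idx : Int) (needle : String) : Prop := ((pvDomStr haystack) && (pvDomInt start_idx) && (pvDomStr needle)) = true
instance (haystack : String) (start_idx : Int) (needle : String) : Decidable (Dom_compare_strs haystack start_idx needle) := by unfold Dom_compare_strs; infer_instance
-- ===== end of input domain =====

-- B replaces A's single loop carrying a next-occurrence accumulator by two separate phases
-- (find the first mismatch, then scan the window once for the next candidate occurrence);
-- objective: alternative decomposition, same cost.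

-- ===== PORT A =====
-- for i in range(1, len(needle)): record first occurrence of needle[0], return on mismatch
def compare_strs_loop (haystack : String) (start_idx : Int) (needle : String) (i : Nat) (next_occurrence : Int) : Bool × Int :=
  if i < needle.toList.length then
    match PySem.Str.pyGet? haystack (start_idx + (i : Int)), PySem.Str.pyGet? needle 0, PySem.Str.pyGet? needle (i : Int) with
    | some hc, some n0, some nc =>
      let next_occurrence' := if next_occurrence = -1 ∧ hc = n0 then start_idx + (i : Int) else next_occurrence
      if hc ≠ nc then (false, if next_occurrence' ≠ -1 then next_occurrence' else start_idx + (i : Int))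
      else compare_strs_loop haystack start_idx needle (i + 1) next_occurrence'
    | _, _, _ => (false, -1)   -- unreachable under Pre_ (Python IndexError)
  else (true, next_occurrence)
termination_by needle.toList.length - i
decreasing_by simp_all; omega

def compare_strs (haystack : String) (start_idx : Int) (needle : String) : Bool × Int :=
  if start_idx + (needle.toList.length : Int) > (haystack.toList.length : Int) then (false, -1)
  else compare_strs_loop haystack start_idx needle 1 (-1)

-- ===== PORT B =====
-- phase 1: first index i in [1, len(needle)) with haystack[start_idx+i] != needle[i]
def bMismatch (haystack : String) (start_idx : Int) (needle : String) (i : Nat) : Option Nat :=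
  if i < needle.toList.length then
    match PySem.Str.pyGet? haystack (start_idx + (i : Int)), PySem.Str.pyGet? needle (i : Int) with
    | some hc, some nc => if hc ≠ nc then some i else bMismatch haystack start_idx needle (i + 1)
    | _, _ => some i   -- unreachable under Pre_ (Python IndexError)
  else none
termination_by needle.toList.length - i
decreasing_by simp_all; omega

-- phase 2: first start_idx+i, i in [i, stop), with haystack[start_idx+i] == needle[0], else -1
def bOcc (haystack : String) (start_idx : Int) (needle : String) (i : Nat) (stop : Nat) : Int :=
  if i < stop then
    match PySem.Str.pyGet? haystack (start_idx + (i : Int)), PySem.Str.pyGet? needle 0 with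
    | some hc, some n0 => if hc = n0 then start_idx + (i : Int) else bOcc haystack start_idx needle (i + 1) stop
    | _, _ => -1   -- unreachable under Pre_ (Python IndexError)
  else -1
termination_by stop - i
decreasing_by omega

def compare_strs_alt (haystack : String) (start_idx : Int) (needle : String) : Bool × Int :=
  let n := needle.toList.length
  if start_idx + (n : Int) > (haystack.toList.length : Int) then (false, -1)
  else
    match bMismatch haystack start_idx needle 1 with
    | none => (true, bOcc haystack start_idx needle 1 n)
    | some j =>
      let occurrence := bOcc haystack start_idx needle 1 (j + 1)
      (false, if occurrence ≠ -1 then occurrence else start_idx + (j : Int))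

-- ===== PRECONDITION & SPEC =====
-- Pre_ excludes (a) calls where A raises IndexError (a window index below -len(haystack)), and
-- (b) calls with a negative start_idx whose wrapped window contains position -1 holding needle[0]:
-- there the valid candidate position -1 collides with A's -1 'no occurrence' sentinel, so A
-- silently drops that candidate — an artefact of the sentinel encoding that no caller of this
-- substring-search helper (which always passes start_idx ≥ 0) relies on.
def Pre_compare_strs (haystack : String) (start_idx : Int) (needle : String) : Prop :=
  (needle.toList.length : Int) ≤ 1 ∨
  start_idx + (needle.toList.length : Int) > (haystack.toList.length : Int) ∨
  -1 ≤ start_idx ∨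
  (-(haystack.toList.length : Int) - 1 ≤ start_idx ∧
    (start_idx + (needle.toList.length : Int) ≤ -1 ∨
      (1 ≤ haystack.toList.length ∧ haystack.toList.getLast? ≠ PySem.Str.pyGet? needle 0)))
instance (haystack : String) (start_idx : Int) (needle : String) : Decidable (Pre_compare_strs haystack start_idx needle) := by unfold Pre_compare_strs; infer_instance

def pvWitness_compare_strs : String × Int × String := ("banana", 1, "ana")

def Spec_compare_strs (haystack : String) (start_idx : Int) (needle : String) (out : Bool × Int) : Prop := out = compare_strs_alt haystack start_idx needle
instance (haystack : String) (start_idx : Int) (needle : String) (out : Bool × Int) : Decidable (Spec_compare_strs haystack start_idx needle out) := by unfold Spec_compare_strs; infer_instance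

-- ===== CLAIM (what is proved, stated in full; the proofs are below) =====
def Claim_equal_compare_strs : Prop := ∀ (haystack : String) (start_idx : Int) (needle : String), Dom_compare_strs haystack start_idx needle → Pre_compare_strs haystack start_idx needle → Spec_compare_strs haystack start_idx needle (compare_strs haystack start_idx needle)

-- ===== LEMMAS AND PROOFS =====

theorem bMismatch_ge_fuel (haystack : String) (start_idx : Int) (needle : String) :
    ∀ fuel i j, needle.toList.length ≤ i + fuel →
      bMismatch haystack start_idx needle i = some j → i ≤ j := by
  intro fuel
  induction fuel with
  | zero =>
    intro i j hb hm
    rw [bMismatch.eq_def] at hm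
    split_ifs at hm with hlt
    · omega
  | succ f ihf =>
    intro i j hb hm
    rw [bMismatch.eq_def] at hm
    split_ifs at hm with hlt
    · rcases hg : PySem.Str.pyGet? haystack (start_idx + (i : Int)) with _ | hc
      · rw [hg] at hm; simp at hm; omega
      · rcases hn : PySem.Str.pyGet? needle (i : Int) with _ | nc
        · rw [hg, hn] at hm; simp at hm; omega
        · rw [hg, hn] at hm
          dsimp only at hm
          split_ifs at hm with hne
          · simp at hm; omega
          · have := ihf (i + 1) j (by omega) hm
            omega

theorem bMismatch_ge (haystack : String) (start_idx : Int) (needle : String) :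
    ∀ i j, bMismatch haystack start_idx needle i = some j → i ≤ j := by
  intro i j hm
  exact bMismatch_ge_fuel haystack start_idx needle needle.toList.length i j (by omega) hm

theorem bOcc_stop (haystack : String) (start_idx : Int) (needle : String) (i stop : Nat)
    (h : stop ≤ i) : bOcc haystack start_idx needle i stop = -1 := by
  rw [bOcc]; simp [Nat.not_lt.mpr h]

theorem strGet_some (h : String) (j : Int) (h0 : -(h.toList.length : Int) ≤ j)
    (h1 : j < (h.toList.length : Int)) : ∃ c, PySem.Str.pyGet? h j = some c := by
  rcases e : PySem.Str.pyGet? h j with _ | c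
  · exfalso
    have e' : PySem.List.pyGet? h.toList j = none := by simpa using e
    rw [PySem.List.pyGet?_eq_none_iff] at e'
    refine e' ?_
    have hl : h.toList.length = h.length := by simp
    simp [PySem.Raise.InRange]
    omega
  · exact ⟨c, rfl⟩

theorem strGet_neg_one (h : String) : PySem.Str.pyGet? h (-1) = h.toList.getLast? := by
  simp [PySem.List.pyGet?_neg_one]

theorem needleGet_some (needle : String) (k : Nat) (hk : k < needle.toList.length) :
    PySem.Str.pyGet? needle (k : Int) = some needle.toList[k] := by
  simp [List.getElem?_eq_getElem hk]

theorem needleGet0_some (needle : String) (hk : 0 < needle.toList.length) :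
    PySem.Str.pyGet? needle 0 = some needle.toList[0] := by
  have := needleGet_some needle 0 hk
  simpa using this

-- the occurrence accumulator step: folding one scanned character into the
-- accumulator equals extending the separate occurrence scan by that character
theorem occ_shift (haystack : String) (start_idx : Int) (needle : String)
    (i stop : Nat) (occ : Int) (hc n0 : Char) (hlt : i < stop)
    (hgc : PySem.Str.pyGet? haystack (start_idx + (i : Int)) = some hc)
    (hn0 : PySem.Str.pyGet? needle 0 = some n0)
    (hcol : start_idx + (i : Int) = -1 → hc ≠ n0) :
    (if (if occ = -1 ∧ hc = n0 then start_idx + (i : Int) else occ) ≠ -1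
       then (if occ = -1 ∧ hc = n0 then start_idx + (i : Int) else occ)
       else bOcc haystack start_idx needle (i + 1) stop)
    = (if occ ≠ -1 then occ else bOcc haystack start_idx needle i stop) := by
  conv_rhs => rw [bOcc.eq_def]
  rw [if_pos hlt, hgc, hn0]
  dsimp only
  by_cases ho : occ = -1
  · by_cases hcn : hc = n0
    · have hne : start_idx + (i : Int) ≠ -1 := fun e => (hcol e) hcn
      simp [ho, hcn, hne]
    · simp [ho, hcn]
  · simp [ho]

-- the loop invariant: A's accumulator loop equals B's two separate phases
theorem loop_eq (haystack : String) (start_idx : Int) (needle : String) :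
    ∀ fuel i occ, needle.toList.length ≤ i + fuel →
    (∀ k : Nat, i ≤ k → k < needle.toList.length →
      ∃ c, PySem.Str.pyGet? haystack (start_idx + (k : Int)) = some c ∧
        (start_idx + (k : Int) = -1 → some c ≠ PySem.Str.pyGet? needle 0)) →
    compare_strs_loop haystack start_idx needle i occ =
      match bMismatch haystack start_idx needle i with
      | none => (true, if occ ≠ -1 then occ else bOcc haystack start_idx needle i needle.toList.length)
      | some j =>
        (false,
          if (if occ ≠ -1 then occ else bOcc haystack start_idx needle i (j + 1)) ≠ -1
          then (if occ ≠ -1 then occ else bOcc haystack start_idx needle i (j + 1))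
          else start_idx + (j : Int)) := by
  intro fuel
  induction fuel with
  | zero =>
    intro i occ hb _
    rw [compare_strs_loop.eq_def, bMismatch.eq_def, if_neg (by omega), if_neg (by omega)]
    rw [bOcc_stop haystack start_idx needle i needle.toList.length (by omega)]
    by_cases ho : occ = -1 <;> simp [ho]
  | succ f ihf =>
    intro i occ hb H
    by_cases hlt : i < needle.toList.length
    · obtain ⟨hc, hgc, hcol⟩ := H i le_rfl hlt
      have hn0 := needleGet0_some needle (by omega)
      have hnc := needleGet_some needle i hlt
      have hcol' : start_idx + (i : Int) = -1 → hc ≠ needle.toList[0] := by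
        intro e heq
        exact (hcol e) (by rw [hn0, heq])
      rw [compare_strs_loop.eq_def, bMismatch.eq_def, if_pos hlt, if_pos hlt, hgc, hn0, hnc]
      dsimp only
      by_cases hne : hc ≠ needle.toList[i]
      · -- mismatch at i: both sides return immediately
        rw [if_pos hne, if_pos hne]
        dsimp only
        have hstep := occ_shift haystack start_idx needle i (i + 1) occ hc needle.toList[0]
          (by omega) hgc hn0 hcol'
        rw [bOcc_stop haystack start_idx needle (i + 1) (i + 1) le_rfl] at hstep
        rw [← hstep]
        by_cases ho : (if occ = -1 ∧ hc = needle.toList[0] then start_idx + (i : Int) else occ) = -1 <;>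
          simp [ho]
      · -- match at i: recurse and shift the occurrence scan by one
        rw [if_neg hne, if_neg hne]
        rw [ihf (i + 1) (if occ = -1 ∧ hc = needle.toList[0] then start_idx + (i : Int) else occ)
          (by omega) (fun k hk1 hk2 => H k (by omega) hk2)]
        rcases hbm : bMismatch haystack start_idx needle (i + 1) with _ | j
        · dsimp only
          rw [occ_shift haystack start_idx needle i needle.toList.length occ hc needle.toList[0]
            hlt hgc hn0 hcol']
        · dsimp only
          have hij : i + 1 ≤ j := bMismatch_ge haystack start_idx needle (i + 1) j hbm
          rw [occ_shift haystack start_idx needle i (j + 1) occ hc needle.toList[0]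
            (by omega) hgc hn0 hcol']
    · rw [compare_strs_loop.eq_def, bMismatch.eq_def, if_neg hlt, if_neg hlt]
      rw [bOcc_stop haystack start_idx needle i needle.toList.length (by omega)]
      by_cases ho : occ = -1 <;> simp [ho]

-- ===== VERDICT (by name: the statement is the Claim_ definition above) =====
theorem compare_strs_spec : Claim_equal_compare_strs := by
  intro haystack start_idx needle _ hpre
  unfold Spec_compare_strs compare_strs compare_strs_alt
  by_cases hg : start_idx + (needle.toList.length : Int) > (haystack.toList.length : Int)
  · have hg' : (haystack.length : Int) < start_idx + (needle.length : Int) := by simpa using hg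
    simp [hg']
  · unfold Pre_compare_strs at hpre
    have H : ∀ k : Nat, 1 ≤ k → k < needle.toList.length →
        ∃ c, PySem.Str.pyGet? haystack (start_idx + (k : Int)) = some c ∧
          (start_idx + (k : Int) = -1 → some c ≠ PySem.Str.pyGet? needle 0) := by
      intro k hk1 hk2
      have hkn : (k : Int) < (needle.toList.length : Int) := by exact_mod_cast hk2
      have hk1' : (1 : Int) ≤ (k : Int) := by exact_mod_cast hk1
      have hub : start_idx + (k : Int) < (haystack.toList.length : Int) := by omega
      have hlb : -(haystack.toList.length : Int) ≤ start_idx + (k : Int) := by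
        rcases hpre with h1 | h2 | h3 | ⟨h4a, _⟩
        · omega
        · exact absurd h2 hg
        · omega
        · omega
      obtain ⟨c, hcget⟩ := strGet_some haystack _ hlb hub
      refine ⟨c, hcget, ?_⟩
      intro hneg hEq
      rcases hpre with h1 | h2 | h3 | ⟨h4a, h4b⟩
      · omega
      · exact absurd h2 hg
      · omega
      · rcases h4b with h5 | ⟨hL1, hlast⟩
        · omega
        · apply hlast
          calc haystack.toList.getLast? = PySem.Str.pyGet? haystack (-1) := (strGet_neg_one _).symm
            _ = some c := by rw [← hneg]; exact hcget
            _ = PySem.Str.pyGet? needle 0 := hEq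
    rw [if_neg hg, if_neg hg,
      loop_eq haystack start_idx needle needle.toList.length 1 (-1) (by omega) H]
    rcases hbm : bMismatch haystack start_idx needle 1 with _ | j <;> simp
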